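-- pv_equiv track=rewrite | github.com/maxcollombin/CartoSymTranscoder | cartosym_transcoder/expression_parser.py | _extract_parens_groups
-- ===== SOURCE A (Python) =====
-- def _extract_parens_groups(text: str) -> list:
--     """Extract content of each top-level (...) group."""
--     groups = []
--     depth = 0
--     current = []
--     for ch in text:
--         if ch == '(':
--             if depth > 0:
--                 current.append(ch)
--             depth += 1
--         elif ch == ')':
--             depth -= 1
--             if depth == 0:
--                 groups.append(''.join(current))
--                 current = []
--             elif depth > 0:
--                 current.append(ch)
--         elif depth > 0:
--             current.append(ch)
--     return groups
-- ===== SOURCE B (Python) =====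
-- def _extract_parens_groups(text: str) -> list:
--     """Extract content of each top-level (...) group via index slicing (no char buffer)."""
--     groups = []
--     depth = 0
--     start = 0
--     for i, ch in enumerate(text):
--         if ch == '(':
--             if depth == 0:
--                 start = i + 1
--             depth += 1
--         elif ch == ')':
--             depth -= 1
--             if depth == 0:
--                 groups.append(text[start:i])
--     return groups
-- ===== Notes on version B (the rewrite author's own statement) =====
-- stated objective: simpler
-- what changed: Replaces A's per-character buffer (appending every inner character, with separate append logic in three branches) by recording the start index after each top-level opening parenthesis and emitting the corresponding slice of text when depth returns to 0; all inner-character handling disappears.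
import Mathlib
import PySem

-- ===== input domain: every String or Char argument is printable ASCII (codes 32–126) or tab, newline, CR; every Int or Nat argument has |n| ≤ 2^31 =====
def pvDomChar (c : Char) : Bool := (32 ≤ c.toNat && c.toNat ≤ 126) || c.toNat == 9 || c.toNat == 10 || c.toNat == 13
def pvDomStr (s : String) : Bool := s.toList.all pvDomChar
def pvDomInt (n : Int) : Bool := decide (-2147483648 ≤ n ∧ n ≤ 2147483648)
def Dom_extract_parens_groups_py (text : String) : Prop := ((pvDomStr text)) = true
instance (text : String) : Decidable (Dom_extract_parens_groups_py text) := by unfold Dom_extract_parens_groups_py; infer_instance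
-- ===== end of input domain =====

-- B replaces A's per-character buffer by recorded start indices and string slices (objective: simpler decomposition; same O(n) cost).

-- ===== PORT A =====
-- one step of A's loop over the characters: state = (groups, depth, current buffer)
def pvStepA (s : List String × Int × List Char) (ch : Char) : List String × Int × List Char :=
  let (groups, depth, current) := s
  if ch = '(' then
    let current := if 0 < depth then current ++ [ch] else current
    (groups, depth + 1, current)
  else if ch = ')' then
    let depth := depth - 1
    if depth = 0 then (groups ++ [String.ofList current], depth, [])
    else if 0 < depth then (groups, depth, current ++ [ch])
    else (groups, depth, current)
  else if 0 < depth then (groups, depth, current ++ [ch])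
  else (groups, depth, current)

def extract_parens_groups_py (text : String) : List String :=
  (text.toList.foldl pvStepA ([], 0, [])).1

-- ===== PORT B =====
-- one step of B's loop over enumerate(text): state = (groups, depth, start index)
def pvStepB (text : String) (s : List String × Int × Int) (p : Int × Char) : List String × Int × Int :=
  let (groups, depth, start) := s
  let (i, ch) := p
  if ch = '(' then
    let start := if depth = 0 then i + 1 else start
    (groups, depth + 1, start)
  else if ch = ')' then
    let depth := depth - 1
    if depth = 0 then (groups ++ [PySem.Str.slice text (some start) (some i)], depth, start)
    else (groups, depth, start)
  else (groups, depth, start)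

def extract_parens_groups_py_alt (text : String) : List String :=
  ((PySem.List.enumerate text.toList 0).foldl (pvStepB text) ([], 0, 0)).1

-- ===== PRECONDITION & SPEC =====
def Spec_extract_parens_groups_py (text : String) (out : List String) : Prop := out = extract_parens_groups_py_alt text
instance (text : String) (out : List String) : Decidable (Spec_extract_parens_groups_py text out) := by unfold Spec_extract_parens_groups_py; infer_instance

-- ===== CLAIM (what is proved, stated in full; the proofs are below) =====
def Claim_equal_extract_parens_groups_py : Prop := ∀ (text : String), Dom_extract_parens_groups_py text → Spec_extract_parens_groups_py text (extract_parens_groups_py text)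

-- ===== LEMMAS AND PROOFS =====

-- extending a slice by the character at its right end
lemma pv_slice_extend (l : List Char) (st i : Nat) (hst : st ≤ i) (hi : i < l.length) :
    List.take (i + 1 - st) (List.drop st l) = List.take (i - st) (List.drop st l) ++ [l[i]] := by
  have h1 : i + 1 - st = (i - st) + 1 := by omega
  have h2 : (List.drop st l)[i - st]? = some l[i] := by
    rw [List.getElem?_drop]
    have : st + (i - st) = i := by omega
    rw [this, List.getElem?_eq_getElem hi]
  rw [h1, List.take_add_one, h2]
  rfl

-- loop invariant: the two folds keep equal groups and depth, the buffer is empty at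
-- depth ≤ 0, and at positive depth the buffer equals the slice text[start:i]
lemma pv_main (text : String) :
    ∀ (cs : List Char) (i st : Nat) (g : List String) (d : Int) (cur : List Char),
    text.toList.drop i = cs →
    (d ≤ 0 → cur = []) →
    (0 < d → st ≤ i ∧ List.take (i - st) (List.drop st text.toList) = cur) →
    (cs.foldl pvStepA (g, d, cur)).1
      = ((PySem.List.enumerate cs (i : Int)).foldl (pvStepB text) (g, d, (st : Int))).1 := by
  intro cs
  induction cs with
  | nil => intro i st g d cur _ _ _; simp [PySem.List.enumerate]
  | cons ch cs' ih =>
    intro i st g d cur hdrop hzero hpos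
    have hi : i < text.toList.length := by
      by_contra h
      rw [List.drop_eq_nil_of_le (by omega)] at hdrop
      exact (List.cons_ne_nil ch cs') hdrop.symm
    have hch : text.toList[i] = ch := by
      have h0 : (text.toList.drop i)[0]? = some ch := by rw [hdrop]; rfl
      rw [List.getElem?_drop] at h0
      simpa [List.getElem?_eq_getElem hi] using h0
    have hdrop' : text.toList.drop (i + 1) = cs' := by
      have h0 : (text.toList.drop i).drop 1 = cs' := by rw [hdrop]; rfl
      rw [List.drop_drop] at h0
      simpa [Nat.add_comm] using h0
    rw [PySem.List.enumerate_cons, List.foldl_cons, List.foldl_cons]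
    have hcast : (i : Int) + 1 = ((i + 1 : Nat) : Int) := by push_cast; ring
    by_cases hL : ch = '('
    · subst hL
      simp only [pvStepA, pvStepB]
      by_cases hd0 : d = 0
      · subst hd0
        have hcur : cur = [] := hzero le_rfl
        subst hcur
        simp only [lt_irrefl]
        rw [hcast]
        exact ih (i+1) (i+1) g 1 [] hdrop' (fun h => absurd h (by omega))
          (fun _ => ⟨le_rfl, by simp⟩)
      · by_cases hdp : 0 < d
        · obtain ⟨hst, hsl⟩ := hpos hdp
          simp only [if_pos hdp, if_neg hd0]
          rw [hcast]
          refine ih (i+1) st g (d+1) (cur ++ ['(']) hdrop' (fun h => absurd h (by omega)) (fun _ => ⟨by omega, ?_⟩)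
          rw [pv_slice_extend _ _ _ hst hi, hsl, hch]
        · have hdn : d < 0 := by omega
          have hcur : cur = [] := hzero (by omega)
          subst hcur
          simp only [if_neg hdp, if_neg hd0]
          rw [hcast]
          exact ih (i+1) st g (d+1) [] hdrop' (fun _ => rfl) (fun h => absurd h (by omega))
    · by_cases hR : ch = ')'
      · subst hR
        simp only [pvStepA, pvStepB, if_neg hL]
        by_cases hd1 : d - 1 = 0
        · obtain ⟨hst, hsl⟩ := hpos (by omega)
          simp only [if_pos hd1]
          have hmk : String.ofList cur = PySem.Str.slice text (some (st : Int)) (some (i : Int)) := by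
            apply String.toList_injective
            rw [PySem.Str.toList_slice]
            simp only [PySem.Chars.slice_eq_listSlice, PySem.List.slice_natCast]
            simpa using hsl.symm
          rw [hmk, hcast]
          exact ih (i+1) st (g ++ [PySem.Str.slice text (some (st:Int)) (some (i:Int))]) (d-1) []
            hdrop' (fun _ => rfl) (fun h => absurd h (by omega))
        · by_cases hdp : 0 < d - 1
          · obtain ⟨hst, hsl⟩ := hpos (by omega)
            simp only [if_neg hd1, if_pos hdp]
            rw [hcast]
            refine ih (i+1) st g (d-1) (cur ++ [')']) hdrop' (fun h => absurd h (by omega)) (fun _ => ⟨by omega, ?_⟩)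
            rw [pv_slice_extend _ _ _ hst hi, hsl, hch]
          · have hcur : cur = [] := hzero (by omega)
            subst hcur
            simp only [if_neg hd1, if_neg hdp]
            rw [hcast]
            exact ih (i+1) st g (d-1) [] hdrop' (fun _ => rfl) (fun h => absurd h (by omega))
      · simp only [pvStepA, pvStepB, if_neg hL, if_neg hR]
        by_cases hdp : 0 < d
        · obtain ⟨hst, hsl⟩ := hpos hdp
          simp only [if_pos hdp]
          rw [hcast]
          refine ih (i+1) st g d (cur ++ [ch]) hdrop' (fun h => absurd h (by omega)) (fun _ => ⟨by omega, ?_⟩)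
          rw [pv_slice_extend _ _ _ hst hi, hsl, hch]
        · have hcur : cur = [] := hzero (by omega)
          subst hcur
          simp only [if_neg hdp]
          rw [hcast]
          exact ih (i+1) st g d [] hdrop' (fun _ => rfl) (fun h => absurd h hdp)

-- ===== VERDICT (by name: the statement is the Claim_ definition above) =====
theorem extract_parens_groups_py_spec : Claim_equal_extract_parens_groups_py := by
  intro text _
  unfold Spec_extract_parens_groups_py extract_parens_groups_py extract_parens_groups_py_alt
  have := pv_main text text.toList 0 0 [] 0 [] (by simp) (fun _ => rfl) (fun h => absurd h (by omega))
  simpa using this
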